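-- pv_equiv track=rewrite | github.com/AvlasovV/BSU.Magistracy | ScriptLanguages/Seminar1/ticket.py | decomposition_of_number
-- ===== SOURCE A (Python) =====
-- def decomposition_of_number(number):  # decompose into 3 terms, I think it should be recursion but now it's not :)
--     result_set = set()
--     for i in range(0, 10):
--         if i > number: break
--         for j in range(0, 10):
--             if j + i > number: break
--             for k in range(0, 10):
--                 if k + i + j > number:
--                     break
--                 elif k + i + j == number:
--                     result_set.add(tuple([i, k, j]))
--     return result_set
-- ===== SOURCE B (Python) =====
-- def decomposition_of_number(number):
--     result_set = set()
--     for i in range(10):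
--         for j in range(10):
--             k = number - i - j
--             if 0 <= k <= 9:
--                 result_set.add((i, k, j))
--     return result_set
-- ===== Notes on version B (the rewrite author's own statement) =====
-- stated objective: simpler
-- what changed: Replaced the innermost search loop (with its break/elif bookkeeping) by computing the third digit in closed form k = number - i - j with a range check, dropping the break-based pruning entirely.
import Mathlib
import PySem

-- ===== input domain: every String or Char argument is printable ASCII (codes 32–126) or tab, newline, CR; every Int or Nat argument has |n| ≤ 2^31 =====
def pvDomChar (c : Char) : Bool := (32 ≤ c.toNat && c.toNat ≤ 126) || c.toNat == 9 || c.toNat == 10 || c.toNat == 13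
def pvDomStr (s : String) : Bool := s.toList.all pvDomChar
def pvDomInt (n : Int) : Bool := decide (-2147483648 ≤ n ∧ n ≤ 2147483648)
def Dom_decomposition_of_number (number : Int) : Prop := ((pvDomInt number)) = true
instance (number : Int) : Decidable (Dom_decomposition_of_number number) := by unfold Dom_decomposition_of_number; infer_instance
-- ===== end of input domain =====

-- ===== PORT A =====
-- B changes: the innermost search loop becomes the closed form k = number - i - j (objective: simpler).
def pvLoopK (number i j : Int) (ks : List Int) (s : PySem.Set (Int × Int × Int)) : PySem.Set (Int × Int × Int) :=
  match ks with
  | [] => s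
  | k :: rest =>
    if k + i + j > number then s
    else if k + i + j == number then pvLoopK number i j rest (PySem.Set.add s (i, k, j))
    else pvLoopK number i j rest s

def pvLoopJ (number i : Int) (js : List Int) (s : PySem.Set (Int × Int × Int)) : PySem.Set (Int × Int × Int) :=
  match js with
  | [] => s
  | j :: rest =>
    if j + i > number then s
    else pvLoopJ number i rest (pvLoopK number i j (PySem.List.pyRange 0 10 1) s)

def pvLoopI (number : Int) (is : List Int) (s : PySem.Set (Int × Int × Int)) : PySem.Set (Int × Int × Int) :=
  match is with
  | [] => s
  | i :: rest =>
    if i > number then s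
    else pvLoopI number rest (pvLoopJ number i (PySem.List.pyRange 0 10 1) s)

def decomposition_of_number (number : Int) : List (Int × Int × Int) :=
  pvLoopI number (PySem.List.pyRange 0 10 1) PySem.Set.empty

-- ===== PORT B =====
def decomposition_of_number_alt (number : Int) : List (Int × Int × Int) :=
  (PySem.List.pyRange 0 10 1).foldl (fun s i =>
    (PySem.List.pyRange 0 10 1).foldl (fun s j =>
      let k := number - i - j
      if 0 ≤ k ∧ k ≤ 9 then PySem.Set.add s (i, k, j) else s) s) PySem.Set.empty

-- ===== PRECONDITION & SPEC =====
def Spec_decomposition_of_number (number : Int) (out : List (Int × Int × Int)) : Prop := out = decomposition_of_number_alt number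
instance (number : Int) (out : List (Int × Int × Int)) : Decidable (Spec_decomposition_of_number number out) := by unfold Spec_decomposition_of_number; infer_instance

-- ===== CLAIM (what is proved, stated in full; the proofs are below) =====
def Claim_equal_decomposition_of_number : Prop := ∀ (number : Int), Dom_decomposition_of_number number → Spec_decomposition_of_number number (decomposition_of_number number)

-- ===== LEMMAS AND PROOFS =====

theorem pvFoldlId {α β : Type} (f : β → α → β) (l : List α) (init : β)
    (h : ∀ s x, x ∈ l → f s x = s) : l.foldl f init = init := by
  induction l generalizing init with
  | nil => rfl
  | cons a t ih =>
      simp only [List.foldl_cons]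
      rw [h init a (by simp)]
      exact ih init (fun s x hx => h s x (by simp [hx]))

theorem pvAltEmpty (number : Int) (h : number < 0 ∨ 27 < number) :
    decomposition_of_number_alt number = [] := by
  unfold decomposition_of_number_alt
  refine pvFoldlId _ _ _ (fun s i hi => ?_)
  rw [PySem.List.mem_pyRange_one] at hi
  refine pvFoldlId _ _ _ (fun t j hj => ?_)
  rw [PySem.List.mem_pyRange_one] at hj
  simp only
  rw [if_neg (by omega)]

theorem pvLoopKId (number i j : Int) (ks : List Int) (s : PySem.Set (Int × Int × Int))
    (h : ∀ k ∈ ks, k + i + j < number) : pvLoopK number i j ks s = s := by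
  induction ks with
  | nil => rfl
  | cons k rest ih =>
      have hk := h k (by simp)
      unfold pvLoopK
      rw [if_neg (by omega), if_neg (by simp; omega)]
      exact ih (fun x hx => h x (by simp [hx]))

theorem pvLoopJId (number i : Int) (js : List Int) (s : PySem.Set (Int × Int × Int))
    (hi : 0 ≤ i ∧ i ≤ 9) (hn : 27 < number)
    (h : ∀ j ∈ js, 0 ≤ j ∧ j ≤ 9) : pvLoopJ number i js s = s := by
  induction js generalizing s with
  | nil => rfl
  | cons j rest ih =>
      have hj := h j (by simp)
      unfold pvLoopJ
      rw [if_neg (by omega)]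
      rw [pvLoopKId number i j _ s (fun k hk => by
        rw [PySem.List.mem_pyRange_one] at hk; omega)]
      exact ih s (fun x hx => h x (by simp [hx]))

theorem pvLoopIId (number : Int) (is : List Int) (s : PySem.Set (Int × Int × Int))
    (hn : 27 < number) (h : ∀ i ∈ is, 0 ≤ i ∧ i ≤ 9) : pvLoopI number is s = s := by
  induction is generalizing s with
  | nil => rfl
  | cons i rest ih =>
      have hi := h i (by simp)
      unfold pvLoopI
      rw [if_neg (by omega)]
      rw [pvLoopJId number i _ s hi hn (fun j hj => by
        rw [PySem.List.mem_pyRange_one] at hj; omega)]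
      exact ih s (fun x hx => h x (by simp [hx]))

theorem pvANegEmpty (number : Int) (h : number < 0) :
    decomposition_of_number number = [] := by
  unfold decomposition_of_number
  rw [PySem.List.pyRange_one_cons (by norm_num)]
  unfold pvLoopI
  rw [if_pos (by omega)]
  rfl

theorem pvALargeEmpty (number : Int) (h : 27 < number) :
    decomposition_of_number number = [] := by
  unfold decomposition_of_number
  exact pvLoopIId number _ _ h (fun i hi => by
    rw [PySem.List.mem_pyRange_one] at hi; omega)

-- ===== VERDICT (by name: the statement is the Claim_ definition above) =====
set_option maxRecDepth 20000 in
theorem decomposition_of_number_spec : Claim_equal_decomposition_of_number := by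
  intro number _
  unfold Spec_decomposition_of_number
  by_cases h1 : number < 0
  · rw [pvANegEmpty number h1, pvAltEmpty number (Or.inl h1)]
  · by_cases h2 : 27 < number
    · rw [pvALargeEmpty number h2, pvAltEmpty number (Or.inr h2)]
    · have hlo : 0 ≤ number := by omega
      have hhi : number ≤ 27 := by omega
      interval_cases number <;> decide
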